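-- pv_equiv track=rewrite | github.com/MrBrantCode/unitest_baseline | mut_generate/mist_train_cf/cf_39338/solution.py | max_equal_sum_subarray
-- ===== SOURCE A (Python) =====
-- from typing import List
--
-- def max_equal_sum_subarray(a: List[int], b: List[int]) -> int:
--     n = len(a)
--     a_sum, b_sum = 0, 0
--     max_k = 0
--     prefix_sums = [[0, 0] for _ in range(n + 1)]
--
--     for i in range(n):
--         a_sum += a[i]
--         b_sum += b[i]
--         prefix_sums[i + 1][0] = a_sum
--         prefix_sums[i + 1][1] = b_sum
--
--     for i in range(n):
--         if prefix_sums[i + 1][0] == prefix_sums[i + 1][1]: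
--             max_k = max(max_k, i + 1)
--
--     return max_k
-- ===== SOURCE B (Python) =====
-- def max_equal_sum_subarray(a, b):
--     n = len(a)
--     d = sum(a) - sum(b[:n])
--     for k in range(n, 0, -1):
--         if d == 0:
--             return k
--         d -= a[k - 1] - b[k - 1]
--     return 0
-- ===== Notes on version B (the rewrite author's own statement) =====
-- stated objective: alternative
-- what changed: Replaces the prefix-sum table plus forward max-scan with a single backward pass over a running total difference that short-circuits at the largest matching prefix.
import Mathlib
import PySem

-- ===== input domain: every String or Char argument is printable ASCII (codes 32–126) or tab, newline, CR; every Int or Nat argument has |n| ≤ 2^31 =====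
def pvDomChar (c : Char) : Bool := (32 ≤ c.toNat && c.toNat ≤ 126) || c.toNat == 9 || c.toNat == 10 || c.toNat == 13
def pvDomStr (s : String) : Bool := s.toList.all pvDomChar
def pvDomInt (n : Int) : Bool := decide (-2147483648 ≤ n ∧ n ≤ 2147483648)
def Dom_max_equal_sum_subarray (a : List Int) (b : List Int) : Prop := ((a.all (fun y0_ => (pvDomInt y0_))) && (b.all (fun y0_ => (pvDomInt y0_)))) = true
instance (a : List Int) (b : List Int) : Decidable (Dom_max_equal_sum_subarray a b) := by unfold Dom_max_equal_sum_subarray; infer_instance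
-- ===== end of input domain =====

-- B replaces A's prefix-sum table plus forward max-scan by one backward pass over a
-- running total difference that short-circuits at the largest matching prefix (alternative decomposition).

-- ===== PORT A =====
-- transliteration: first loop fills prefix_sums[i+1], second loop takes the max matching index
def max_equal_sum_subarray (a : List Int) (b : List Int) : Int :=
  let n := a.length
  let st := (List.range n).foldl
    (fun (st : Int × Int × List (Int × Int)) (i : Nat) =>
      let aSum := st.1 + (PySem.List.pyGet? a (i : Int)).getD 0
      let bSum := st.2.1 + (PySem.List.pyGet? b (i : Int)).getD 0
      (aSum, bSum, st.2.2.set (i + 1) (aSum, bSum)))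
    ((0 : Int), (0 : Int), List.replicate (n + 1) ((0 : Int), (0 : Int)))
  (List.range n).foldl
    (fun (maxK : Int) (i : Nat) =>
      let p := st.2.2.getD (i + 1) (0, 0)
      if p.1 = p.2 then max maxK ((i : Int) + 1) else maxK)
    0

-- ===== PORT B =====
-- backward scan: d is the prefix-sum difference at position k; return k at the first (largest) zero
def pvAltLoop (a : List Int) (b : List Int) : Nat → Int → Int
  | 0, _ => 0
  | k + 1, d =>
    if d = 0 then ((k : Int) + 1)
    else pvAltLoop a b k (d - ((PySem.List.pyGet? a (k : Int)).getD 0 - (PySem.List.pyGet? b (k : Int)).getD 0))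

def max_equal_sum_subarray_alt (a : List Int) (b : List Int) : Int :=
  let n := a.length
  pvAltLoop a b n (a.sum - (PySem.List.slice b none (some (n : Int))).sum)

-- ===== PRECONDITION & SPEC =====
-- A raises IndexError (b[i]) when b is shorter than a; exactly those inputs are excluded.
def Pre_max_equal_sum_subarray (a : List Int) (b : List Int) : Prop := a.length ≤ b.length
instance (a : List Int) (b : List Int) : Decidable (Pre_max_equal_sum_subarray a b) := by unfold Pre_max_equal_sum_subarray; infer_instance

def pvWitness_max_equal_sum_subarray : List Int × List Int := ([1, -1, 2], [0, 0, 2])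

def Spec_max_equal_sum_subarray (a : List Int) (b : List Int) (out : Int) : Prop := out = max_equal_sum_subarray_alt a b
instance (a : List Int) (b : List Int) (out : Int) : Decidable (Spec_max_equal_sum_subarray a b out) := by unfold Spec_max_equal_sum_subarray; infer_instance

-- ===== CLAIM (what is proved, stated in full; the proofs are below) =====
def Claim_equal_max_equal_sum_subarray : Prop := ∀ (a : List Int) (b : List Int), Dom_max_equal_sum_subarray a b → Pre_max_equal_sum_subarray a b → Spec_max_equal_sum_subarray a b (max_equal_sum_subarray a b)

-- ===== LEMMAS AND PROOFS =====

-- prefix sum of the first k elements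
def pvPref (l : List Int) (k : Nat) : Int := (l.take k).sum

-- the common spec: largest 1 ≤ j ≤ k with matching prefix sums, else 0
def pvM (a : List Int) (b : List Int) : Nat → Int
  | 0 => 0
  | k + 1 => if pvPref a (k + 1) = pvPref b (k + 1) then ((k : Int) + 1) else pvM a b k

theorem pvM_le (a b : List Int) (k : Nat) : pvM a b k ≤ (k : Int) := by
  induction k with
  | zero => simp [pvM]
  | succ k ih =>
    simp only [pvM]
    split_ifs with h
    · omega
    · push_cast; omega

theorem pvPref_succ (l : List Int) (k : Nat) (hk : k < l.length) :
    pvPref l (k + 1) = pvPref l k + l[k] := by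
  unfold pvPref
  rw [List.take_add_one, List.sum_append, List.getElem?_eq_getElem hk]
  simp

theorem pvAltLoop_eq (a b : List Int) (k : Nat) (hka : k ≤ a.length) (hkb : k ≤ b.length) :
    pvAltLoop a b k (pvPref a k - pvPref b k) = pvM a b k := by
  induction k with
  | zero => simp [pvAltLoop, pvM]
  | succ k ih =>
    have hka' : k < a.length := by omega
    have hkb' : k < b.length := by omega
    simp only [pvAltLoop, pvM]
    split_ifs with h h2 h2
    · rfl
    · exact absurd (by omega) h2
    · exact absurd (by omega : pvPref a (k+1) - pvPref b (k+1) = 0) h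
    · rw [show pvPref a (k + 1) - pvPref b (k + 1) -
            ((PySem.List.pyGet? a (k : Int)).getD 0 - (PySem.List.pyGet? b (k : Int)).getD 0)
          = pvPref a k - pvPref b k by
          rw [pvPref_succ a k hka', pvPref_succ b k hkb']
          simp [hka', hkb']
          ring]
      exact ih (by omega) (by omega)

-- first loop of A: after m steps the running sums are the m-th prefix sums and
-- the table holds every prefix pair up to m
theorem pvLoop1 (a b : List Int) (hn : a.length ≤ b.length) (m : Nat) (hm : m ≤ a.length) :
    ((List.range m).foldl
      (fun (st : Int × Int × List (Int × Int)) (i : Nat) =>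
        let aSum := st.1 + (PySem.List.pyGet? a (i : Int)).getD 0
        let bSum := st.2.1 + (PySem.List.pyGet? b (i : Int)).getD 0
        (aSum, bSum, st.2.2.set (i + 1) (aSum, bSum)))
      ((0 : Int), (0 : Int), List.replicate (a.length + 1) ((0 : Int), (0 : Int)))).1 = pvPref a m ∧
    ((List.range m).foldl
      (fun (st : Int × Int × List (Int × Int)) (i : Nat) =>
        let aSum := st.1 + (PySem.List.pyGet? a (i : Int)).getD 0
        let bSum := st.2.1 + (PySem.List.pyGet? b (i : Int)).getD 0
        (aSum, bSum, st.2.2.set (i + 1) (aSum, bSum)))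
      ((0 : Int), (0 : Int), List.replicate (a.length + 1) ((0 : Int), (0 : Int)))).2.1 = pvPref b m ∧
    ((List.range m).foldl
      (fun (st : Int × Int × List (Int × Int)) (i : Nat) =>
        let aSum := st.1 + (PySem.List.pyGet? a (i : Int)).getD 0
        let bSum := st.2.1 + (PySem.List.pyGet? b (i : Int)).getD 0
        (aSum, bSum, st.2.2.set (i + 1) (aSum, bSum)))
      ((0 : Int), (0 : Int), List.replicate (a.length + 1) ((0 : Int), (0 : Int)))).2.2.length = a.length + 1 ∧
    ∀ j ≤ m, ((List.range m).foldl
      (fun (st : Int × Int × List (Int × Int)) (i : Nat) =>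
        let aSum := st.1 + (PySem.List.pyGet? a (i : Int)).getD 0
        let bSum := st.2.1 + (PySem.List.pyGet? b (i : Int)).getD 0
        (aSum, bSum, st.2.2.set (i + 1) (aSum, bSum)))
      ((0 : Int), (0 : Int), List.replicate (a.length + 1) ((0 : Int), (0 : Int)))).2.2.getD j (0, 0)
        = (pvPref a j, pvPref b j) := by
  induction m with
  | zero =>
    refine ⟨by simp [pvPref], by simp [pvPref], by simp, ?_⟩
    intro j hj
    interval_cases j
    simp [pvPref, List.getD]
  | succ m ih =>
    have ih := ih (by omega)
    obtain ⟨h1, h2, h3, h4⟩ := ih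
    have hma : m < a.length := by omega
    have hmb : m < b.length := by omega
    rw [List.range_succ, List.foldl_append]
    simp only [List.foldl_cons, List.foldl_nil]
    refine ⟨?_, ?_, ?_, ?_⟩
    · simp only [h1]
      rw [pvPref_succ a m hma]
      simp [hma]
    · simp only [h2]
      rw [pvPref_succ b m hmb]
      simp [hmb]
    · rw [List.length_set]; exact h3
    · intro j hj
      by_cases hjm : j = m + 1
      · subst hjm
        simp only [List.getD]
        rw [List.getElem?_set_self (lt_of_lt_of_eq (show m + 1 < a.length + 1 by omega) h3.symm)]
        simp only [Option.getD_some, h1, h2]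
        rw [pvPref_succ a m hma, pvPref_succ b m hmb]
        simp [hma, hmb]
      · simp only [List.getD]
        rw [List.getElem?_set_ne (by omega)]
        exact h4 j (by omega)

-- second loop of A equals pvM, given the table values
theorem pvLoop2 (a b : List Int) (L : List (Int × Int))
    (hL : ∀ j ≤ a.length, L.getD j (0, 0) = (pvPref a j, pvPref b j))
    (m : Nat) (hm : m ≤ a.length) :
    (List.range m).foldl
      (fun (maxK : Int) (i : Nat) =>
        let p := L.getD (i + 1) (0, 0)
        if p.1 = p.2 then max maxK ((i : Int) + 1) else maxK)
      0 = pvM a b m := by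
  induction m with
  | zero => simp [pvM]
  | succ m ih =>
    rw [List.range_succ, List.foldl_append]
    simp only [List.foldl_cons, List.foldl_nil, ih (by omega)]
    rw [hL (m + 1) (by omega)]
    simp only [pvM]
    have := pvM_le a b m
    split_ifs with h
    · omega
    · rfl

-- ===== VERDICT (by name: the statement is the Claim_ definition above) =====
theorem max_equal_sum_subarray_spec : Claim_equal_max_equal_sum_subarray := by
  intro a b _ hpre
  unfold Spec_max_equal_sum_subarray max_equal_sum_subarray max_equal_sum_subarray_alt
  dsimp only
  have hpre' : a.length ≤ b.length := hpre
  obtain ⟨h1, h2, h3, h4⟩ := pvLoop1 a b hpre' a.length le_rfl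
  rw [pvLoop2 a b _ h4 a.length le_rfl]
  rw [PySem.List.slice_to]
  have hbt : (b.take (((a.length : Int)).toNat)).sum = pvPref b a.length := by
    simp [pvPref]
  rw [show a.sum = pvPref a a.length by simp [pvPref]]
  rw [hbt, pvAltLoop_eq a b a.length le_rfl hpre']
  exact Int.natCast_nonneg _
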